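-- pv_equiv track=rewrite | github.com/pemcconnell/euler | 6/6.py | sumn
-- ===== SOURCE A (Python) =====
-- def sumn(n):
-- 	i = 1
-- 	r = 0
-- 	rs = 0
-- 	while i <= n:
-- 		r += i
-- 		rs += i*i
-- 		i += 1
-- 	return [r,rs]
-- ===== SOURCE B (Python) =====
-- def sumn(n):
--     m = n if n > 0 else 0
--     return [m * (m + 1) // 2, m * (m + 1) * (2 * m + 1) // 6]
-- ===== Notes on version B (the rewrite author's own statement) =====
-- stated objective: faster
-- what changed: Replaced the O(n) accumulation loop with the closed-form formulas n(n+1)/2 and n(n+1)(2n+1)/6.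
import Mathlib
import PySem

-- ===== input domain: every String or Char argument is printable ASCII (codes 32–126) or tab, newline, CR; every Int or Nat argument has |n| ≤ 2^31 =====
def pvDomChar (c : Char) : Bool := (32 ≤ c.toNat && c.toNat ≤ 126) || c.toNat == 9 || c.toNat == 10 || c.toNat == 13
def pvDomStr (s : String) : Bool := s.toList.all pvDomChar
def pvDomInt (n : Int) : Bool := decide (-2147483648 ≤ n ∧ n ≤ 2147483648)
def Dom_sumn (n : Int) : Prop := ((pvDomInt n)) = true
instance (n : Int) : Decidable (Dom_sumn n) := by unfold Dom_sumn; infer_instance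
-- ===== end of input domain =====

-- B replaces A's O(n) accumulation loop with the closed-form formulas n(n+1)/2 and n(n+1)(2n+1)/6 (faster).

-- ===== PORT A =====
-- A's while loop: i counts up from 1 while i ≤ n, accumulating r and rs.
def sumnLoop (n i r rs : Int) : List Int :=
  if i ≤ n then sumnLoop n (i + 1) (r + i) (rs + i * i) else [r, rs]
termination_by (n + 1 - i).toNat
decreasing_by omega

def sumn (n : Int) : List Int := sumnLoop n 1 0 0

-- ===== PORT B =====
def sumn_alt (n : Int) : List Int :=
  let m : Int := if n > 0 then n else 0
  [PySem.Int.floordiv (m * (m + 1)) 2, PySem.Int.floordiv (m * (m + 1) * (2 * m + 1)) 6]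

-- ===== PRECONDITION & SPEC =====
def Spec_sumn (n : Int) (out : List Int) : Prop := out = sumn_alt n
instance (n : Int) (out : List Int) : Decidable (Spec_sumn n out) := by unfold Spec_sumn; infer_instance

-- ===== CLAIM (what is proved, stated in full; the proofs are below) =====
def Claim_equal_sumn : Prop := ∀ (n : Int), Dom_sumn n → Spec_sumn n (sumn n)

-- ===== LEMMAS AND PROOFS =====

-- Loop invariant: entering the loop at i ≤ n+1 yields the accumulators plus sums
-- a, b satisfying 2a = n(n+1) - (i-1)i and 6b = n(n+1)(2n+1) - (i-1)i(2i-1).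
lemma sumnLoop_inv : ∀ (fuel : Nat) (n i r rs : Int), (n + 1 - i).toNat = fuel → i ≤ n + 1 →
    ∃ a b, sumnLoop n i r rs = [r + a, rs + b] ∧
      2 * a = n * (n + 1) - (i - 1) * i ∧
      6 * b = n * (n + 1) * (2 * n + 1) - (i - 1) * i * (2 * i - 1) := by
  intro fuel
  induction fuel with
  | zero =>
    intro n i r rs hf hi
    have hin : i = n + 1 := by omega
    refine ⟨0, 0, ?_, by subst hin; ring, by subst hin; ring⟩
    rw [sumnLoop]
    simp [show ¬ i ≤ n by omega]
  | succ k ih =>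
    intro n i r rs hf hi
    have hle : i ≤ n := by omega
    obtain ⟨a, b, heq, h2, h6⟩ := ih n (i + 1) (r + i) (rs + i * i) (by omega) (by omega)
    refine ⟨i + a, i * i + b, ?_, by linear_combination h2, ?_⟩
    · rw [sumnLoop]
      simp only [hle, if_true]
      rw [heq]; ring_nf
    · linear_combination h6

lemma floordiv_exact (a b : Int) (hb : (0:Int) < b) : PySem.Int.floordiv (b * a) b = a := by
  rw [PySem.Int.floordiv_eq_ediv_of_pos hb]
  exact Int.mul_ediv_cancel_left a (by omega)

-- ===== VERDICT =====
theorem sumn_spec : Claim_equal_sumn := by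
  intro n _
  unfold Spec_sumn sumn sumn_alt
  by_cases hn : n > 0
  · obtain ⟨a, b, heq, h2, h6⟩ := sumnLoop_inv (n + 1 - 1).toNat n 1 0 0 rfl (by omega)
    simp only [hn, if_true]
    rw [heq]
    have ha : n * (n + 1) = 2 * a := by linear_combination -h2
    have hb : n * (n + 1) * (2 * n + 1) = 6 * b := by linear_combination -h6
    rw [hb, ha, floordiv_exact a 2 (by norm_num), floordiv_exact b 6 (by norm_num)]
    simp
  · simp only [hn, if_false]
    rw [sumnLoop]
    simp only [show ¬ (1:Int) ≤ n by omega, if_false]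
    norm_num [PySem.Int.floordiv_eq_ediv_of_pos]
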